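-- pv_equiv track=rewrite | github.com/akshey-kumar/bundlenet_results | c_elegans_results/time_alignment/slider_time_alignment.py | extract_bouts
-- ===== SOURCE A (Python) =====
-- def extract_bouts(B, b):
--     bouts = []
--     current_bout = []
--     for i, val in enumerate(B):
--         if val == b:
--             current_bout.append(i)
--         else:
--             if current_bout:
--                 bouts.append(current_bout)
--                 current_bout = []
--     if current_bout:
--         bouts.append(current_bout)
--     return sorted(bouts, key=len)
-- ===== SOURCE B (Python) =====
-- def extract_bouts(B, b):
--     # Boundary detection over a boolean mask: a bout starts where the mask
--     # rises (True after False/edge) and ends where it falls; pair starts with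
--     # ends and materialize each bout as a range.
--     mask = [val == b for val in B]
--     starts = [i for i, (m, prev) in enumerate(zip(mask, [False] + mask)) if m and not prev]
--     ends = [i + 1 for i, (m, nxt) in enumerate(zip(mask, mask[1:] + [False])) if m and not nxt]
--     return sorted([list(range(s, e)) for s, e in zip(starts, ends)], key=len)
-- ===== Notes on version B (the rewrite author's own statement) =====
-- stated objective: alternative
-- what changed: Replaces A's stateful accumulator scan (building each bout element-by-element and flushing it on mismatch) with edge detection on a boolean mask: compute rising-edge start positions and falling-edge end positions by zipping the mask against its shifted copies, pair starts with ends, and materialize each bout as a range.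
import Mathlib
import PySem

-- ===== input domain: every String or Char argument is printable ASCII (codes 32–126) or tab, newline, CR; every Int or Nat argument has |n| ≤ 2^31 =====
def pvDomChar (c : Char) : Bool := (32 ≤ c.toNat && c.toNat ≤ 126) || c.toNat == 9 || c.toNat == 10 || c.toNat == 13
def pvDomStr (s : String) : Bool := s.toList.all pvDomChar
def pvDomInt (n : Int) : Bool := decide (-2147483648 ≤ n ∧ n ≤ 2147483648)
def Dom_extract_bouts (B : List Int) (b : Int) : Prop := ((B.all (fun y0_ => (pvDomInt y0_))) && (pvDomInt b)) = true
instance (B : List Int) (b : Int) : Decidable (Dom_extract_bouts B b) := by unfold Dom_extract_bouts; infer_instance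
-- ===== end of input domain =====

-- B replaces A's flag-carrying accumulator scan with mask-based boundary detection (rise/fall edges paired into ranges); objective: alternative.


-- ===== PORT A =====
-- loop body of A: state = (bouts, current_bout)
def pvStepA (b : Int) (st : List (List Int) × List Int) (p : Int × Int) : List (List Int) × List Int :=
  if p.2 = b then (st.1, st.2 ++ [p.1])
  else if st.2 ≠ [] then (st.1 ++ [st.2], []) else st

def extract_bouts (B : List Int) (b : Int) : List (List Int) :=
  let st := (PySem.List.enumerate B).foldl (pvStepA b) ([], [])
  let bouts := if st.2 ≠ [] then st.1 ++ [st.2] else st.1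
  PySem.List.sorted bouts (fun l => (l.length : Int))

-- ===== PORT B =====
-- boundary detection: mask = [val == b], starts at rising edges, ends at falling edges, paired into ranges
def extract_bouts_alt (B : List Int) (b : Int) : List (List Int) :=
  let mask := B.map (fun v => v == b)
  let starts := (PySem.List.enumerate (mask.zip (false :: mask))).filterMap
    (fun q => if q.2.1 && !q.2.2 then some q.1 else none)
  let ends := (PySem.List.enumerate (mask.zip (mask.drop 1 ++ [false]))).filterMap
    (fun q => if q.2.1 && !q.2.2 then some (q.1 + 1) else none)
  PySem.List.sorted ((starts.zip ends).map (fun se => PySem.List.pyRange se.1 se.2 1))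
    (fun l => (l.length : Int))

-- ===== PRECONDITION & SPEC =====
def Spec_extract_bouts (B : List Int) (b : Int) (out : List (List Int)) : Prop := out = extract_bouts_alt B b
instance (B : List Int) (b : Int) (out : List (List Int)) : Decidable (Spec_extract_bouts B b out) := by unfold Spec_extract_bouts; infer_instance

-- ===== CLAIM (what is proved, stated in full; the proofs are below) =====
def Claim_equal_extract_bouts : Prop := ∀ (B : List Int) (b : Int), Dom_extract_bouts B b → Spec_extract_bouts B b (extract_bouts B b)

-- ===== LEMMAS AND PROOFS =====

-- canonical run decomposition of l at offset s (proof-side reference)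
def pvCanon (b : Int) : Int → List Int → List (List Int)
  | _, [] => []
  | s, x :: xs =>
    if x = b then
      match pvCanon b (s+1) xs with
      | [] => [[s]]
      | r :: rs => if r.head? = some (s+1) then (s :: r) :: rs else [s] :: r :: rs
    else pvCanon b (s+1) xs

-- flushing A's pending bout into the canonical runs of the rest
def pvMerge (cur : List Int) (s : Int) (runs : List (List Int)) : List (List Int) :=
  if cur = [] then runs else
  match runs with
  | [] => [cur]
  | r :: rs => if r.head? = some s then (cur ++ r) :: rs else cur :: r :: rs

-- rising-edge positions, p = whether the previous element matched
def pvStarts (b : Int) : Bool → Int → List Int → List Int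
  | _, _, [] => []
  | p, s, x :: xs => if (x == b) && !p then s :: pvStarts b (x == b) (s+1) xs
                     else pvStarts b (x == b) (s+1) xs

-- falling-edge positions (exclusive ends)
def pvEnds (b : Int) : Int → List Int → List Int
  | _, [] => []
  | s, [x] => if x == b then [s+1] else []
  | s, x :: y :: ys => if (x == b) && !(y == b) then (s+1) :: pvEnds b (s+1) (y :: ys)
                       else pvEnds b (s+1) (y :: ys)

def pvBuild (sts ens : List Int) : List (List Int) :=
  (sts.zip ens).map (fun se => PySem.List.pyRange se.1 se.2 1)

theorem pv_starts_bridge (b : Int) (l : List Int) (p : Bool) (s : Int) :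
    (PySem.List.enumerate ((l.map (fun v => v == b)).zip (p :: l.map (fun v => v == b))) s).filterMap
      (fun q => if q.2.1 && !q.2.2 then some q.1 else none) = pvStarts b p s l := by
  induction l generalizing p s with
  | nil => simp [pvStarts, PySem.List.enumerate_nil]
  | cons x xs ih =>
    simp only [List.map_cons, List.zip_cons_cons, PySem.List.enumerate_cons,
      List.filterMap_cons, ih]
    by_cases h : ((x == b) && !p) = true <;> simp [h, pvStarts]

theorem pv_ends_bridge (b : Int) (l : List Int) (s : Int) :
    (PySem.List.enumerate ((l.map (fun v => v == b)).zip ((l.map (fun v => v == b)).drop 1 ++ [false])) s).filterMap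
      (fun q => if q.2.1 && !q.2.2 then some (q.1 + 1) else none) = pvEnds b s l := by
  induction l generalizing s with
  | nil => simp [pvEnds, PySem.List.enumerate_nil]
  | cons x xs ih =>
    cases xs with
    | nil =>
      by_cases h : (x == b) = true <;>
        simp [pvEnds, PySem.List.enumerate_cons, PySem.List.enumerate_nil, h]
    | cons y ys =>
      simp only [List.map_cons, List.drop_succ_cons, List.drop_zero, List.cons_append,
        List.zip_cons_cons, PySem.List.enumerate_cons, List.filterMap_cons]
      have ih' := ih (s+1)
      simp only [List.map_cons, List.drop_succ_cons, List.drop_zero] at ih'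
      simp only [ih']
      by_cases h : ((x == b) && !(y == b)) = true <;> simp [h, pvEnds]

theorem pv_canon_head_ge (b : Int) (l : List Int) (s : Int) (r : List Int) (rs : List (List Int))
    (h : pvCanon b s l = r :: rs) : ∃ j, r.head? = some j ∧ s ≤ j := by
  induction l generalizing s r rs with
  | nil => simp [pvCanon] at h
  | cons x xs ih =>
    rw [pvCanon] at h
    by_cases hx : x = b
    · rw [if_pos hx] at h
      cases hc : pvCanon b (s+1) xs with
      | nil => rw [hc] at h; exact ⟨s, by simp at h; simp [← h.1], le_refl s⟩
      | cons r' rs' =>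
        rw [hc] at h
        by_cases hh : r'.head? = some (s+1) <;> simp [hh] at h
        · exact ⟨s, by simp [← h.1], le_refl s⟩
        · exact ⟨s, by simp [← h.1], le_refl s⟩
    · rw [if_neg hx] at h
      obtain ⟨j, hj, hsj⟩ := ih (s+1) r rs h
      exact ⟨j, hj, by omega⟩

theorem pv_canon_head_eq (b : Int) (x : Int) (xs : List Int) (s : Int) (hx : x = b) :
    ∃ r rs, pvCanon b s (x :: xs) = r :: rs ∧ r.head? = some s := by
  rw [pvCanon, if_pos hx]
  cases hc : pvCanon b (s+1) xs with
  | nil => exact ⟨[s], [], rfl, rfl⟩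
  | cons r' rs' =>
    by_cases hh : r'.head? = some (s+1)
    · exact ⟨s :: r', rs', by simp [hh], rfl⟩
    · exact ⟨[s], r' :: rs', by simp [hh], rfl⟩

theorem pv_fold_eq_canon (b : Int) (l : List Int) (s : Int) (bouts : List (List Int)) (cur : List Int) :
    (if ((PySem.List.enumerate l s).foldl (pvStepA b) (bouts, cur)).2 ≠ []
     then ((PySem.List.enumerate l s).foldl (pvStepA b) (bouts, cur)).1
            ++ [((PySem.List.enumerate l s).foldl (pvStepA b) (bouts, cur)).2]
     else ((PySem.List.enumerate l s).foldl (pvStepA b) (bouts, cur)).1)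
    = bouts ++ pvMerge cur s (pvCanon b s l) := by
  induction l generalizing s bouts cur with
  | nil =>
    by_cases hc : cur = [] <;>
      simp [hc, pvCanon, pvMerge, PySem.List.enumerate_nil]
  | cons x xs ih =>
    rw [PySem.List.enumerate_cons]
    simp only [List.foldl_cons]
    by_cases hx : x = b
    · rw [show pvStepA b (bouts, cur) (s, x) = (bouts, cur ++ [s]) from by
        simp [pvStepA, hx]]
      rw [ih (s+1) bouts (cur ++ [s])]
      congr 1
      rw [show pvCanon b s (x :: xs) = (match pvCanon b (s+1) xs with
            | [] => [[s]]
            | r :: rs => if r.head? = some (s+1) then (s :: r) :: rs else [s] :: r :: rs)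
          from by rw [pvCanon, if_pos hx]]
      cases hc : pvCanon b (s+1) xs with
      | nil => by_cases hcur : cur = [] <;> simp [pvMerge, hcur]
      | cons r rs =>
        by_cases hh : r.head? = some (s+1) <;>
          by_cases hcur : cur = [] <;> simp [pvMerge, hcur, hh]
    · rw [show pvStepA b (bouts, cur) (s, x)
            = if cur ≠ [] then (bouts ++ [cur], []) else (bouts, cur) from by
        simp [pvStepA, hx]]
      rw [show pvCanon b s (x :: xs) = pvCanon b (s+1) xs from by rw [pvCanon, if_neg hx]]
      by_cases hcur : cur = []
      · subst hcur
        rw [show (if ([] : List Int) ≠ [] then (bouts ++ [([] : List Int)], ([] : List Int))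
              else (bouts, ([] : List Int))) = (bouts, ([] : List Int)) from by simp]
        rw [ih (s+1) bouts []]
        simp [pvMerge]
      · rw [if_pos hcur]
        rw [ih (s+1) (bouts ++ [cur]) []]
        have hm : pvMerge cur s (pvCanon b (s+1) xs) = cur :: pvCanon b (s+1) xs := by
          cases hc : pvCanon b (s+1) xs with
          | nil => simp [pvMerge, hcur]
          | cons r rs =>
            obtain ⟨j, hj, hsj⟩ := pv_canon_head_ge b xs (s+1) r rs hc
            have : ¬ r.head? = some s := by rw [hj]; intro h; injection h with h; omega
            simp [pvMerge, hcur, this]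
        rw [hm]
        simp [pvMerge]

theorem pv_build_eq_canon (b : Int) (l : List Int) (s : Int) :
    pvBuild (pvStarts b false s l) (pvEnds b s l) = pvCanon b s l := by
  induction l generalizing s with
  | nil => simp [pvStarts, pvEnds, pvCanon, pvBuild]
  | cons x xs ih =>
    by_cases hx : x = b
    · cases xs with
      | nil =>
        simp [pvStarts, pvEnds, pvCanon, pvBuild, hx, PySem.List.pyRange_one_singleton]
      | cons y ys =>
        by_cases hy : y = b
        · -- merge with the run starting at s+1
          obtain ⟨r, rs, hc, hrh⟩ := pv_canon_head_eq b y ys (s+1) hy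
          have hih := ih (s+1)
          rw [hc] at hih
          have hS : pvStarts b false (s+1) (y :: ys) = (s+1) :: pvStarts b true (s+1+1) ys := by
            simp [pvStarts, hy]
          rw [hS] at hih
          cases hE : pvEnds b (s+1) (y :: ys) with
          | nil => rw [hE] at hih; simp [pvBuild] at hih
          | cons e es =>
            rw [hE] at hih
            simp only [pvBuild, List.zip_cons_cons, List.map_cons, List.cons.injEq] at hih
            obtain ⟨hr, hrs⟩ := hih
            have hrne : r ≠ [] := by intro h; rw [h] at hrh; simp at hrh
            have hlt : s + 1 < e := by
              by_contra hle
              apply hrne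
              rw [← hr, PySem.List.pyRange_one_eq_nil (by omega)]
            rw [show pvCanon b s (x :: y :: ys)
                  = (s :: r) :: rs from by rw [pvCanon, if_pos hx, hc]; simp [hrh]]
            rw [show pvStarts b false s (x :: y :: ys)
                  = s :: pvStarts b true (s+1+1) ys from by simp [pvStarts, hx, hy]]
            rw [show pvEnds b s (x :: y :: ys) = e :: es from by
              rw [show pvEnds b s (x :: y :: ys) = pvEnds b (s+1) (y :: ys) from by
                simp [pvEnds, hx, hy], hE]]
            simp only [pvBuild, List.zip_cons_cons, List.map_cons, List.cons.injEq]
            constructor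
            · rw [PySem.List.pyRange_one_cons (by omega), ← hr]
            · simpa [pvBuild] using hrs
        · -- bout of length ≥ 1 ends at s+1? no: y ≠ b, run is exactly [s]
          have hS : pvStarts b false s (x :: y :: ys)
              = s :: pvStarts b false (s+1) (y :: ys) := by
            simp [pvStarts, hx, hy]
          have hE : pvEnds b s (x :: y :: ys) = (s+1) :: pvEnds b (s+1) (y :: ys) := by
            simp [pvEnds, hx, hy]
          rw [hS, hE]
          simp only [pvBuild, List.zip_cons_cons, List.map_cons]
          rw [show PySem.List.pyRange s (s+1) 1 = [s] from PySem.List.pyRange_one_singleton s]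
          have hih := ih (s+1)
          rw [show ((pvStarts b false (s+1) (y :: ys)).zip (pvEnds b (s+1) (y :: ys))).map
                (fun se => PySem.List.pyRange se.1 se.2 1)
              = pvBuild (pvStarts b false (s+1) (y :: ys)) (pvEnds b (s+1) (y :: ys)) from rfl,
            hih]
          rw [show pvCanon b s (x :: y :: ys) = (match pvCanon b (s+1) (y :: ys) with
                | [] => [[s]]
                | r :: rs => if r.head? = some (s+1) then (s :: r) :: rs else [s] :: r :: rs)
              from by rw [pvCanon, if_pos hx]]
          cases hc : pvCanon b (s+1) (y :: ys) with
          | nil => rfl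
          | cons r rs =>
            rw [show pvCanon b (s+1) (y :: ys) = pvCanon b (s+1+1) ys from by
              rw [pvCanon, if_neg hy]] at hc
            obtain ⟨j, hj, hsj⟩ := pv_canon_head_ge b ys (s+1+1) r rs hc
            have : ¬ r.head? = some (s+1) := by rw [hj]; intro h; injection h with h; omega
            simp [this]
    · have hxb : (x == b) = false := by simp [hx]
      have hS : pvStarts b false s (x :: xs) = pvStarts b false (s+1) xs := by
        simp [pvStarts, hxb]
      have hE : pvEnds b s (x :: xs) = pvEnds b (s+1) xs := by
        cases xs with
        | nil => simp [pvEnds, hx]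
        | cons y ys => simp [pvEnds, hx]
      rw [hS, hE, ih (s+1), pvCanon, if_neg hx]

-- ===== VERDICT (by name: the statement is the Claim_ definition above) =====
theorem extract_bouts_spec : Claim_equal_extract_bouts := by
  intro B b _
  unfold Spec_extract_bouts
  show PySem.List.sorted
        (if ((PySem.List.enumerate B).foldl (pvStepA b) ([], [])).2 ≠ []
         then ((PySem.List.enumerate B).foldl (pvStepA b) ([], [])).1
                ++ [((PySem.List.enumerate B).foldl (pvStepA b) ([], [])).2]
         else ((PySem.List.enumerate B).foldl (pvStepA b) ([], [])).1)
        (fun l => (l.length : Int))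
      = extract_bouts_alt B b
  rw [pv_fold_eq_canon b B 0 [] []]
  show PySem.List.sorted ([] ++ pvMerge [] 0 (pvCanon b 0 B)) (fun l => (l.length : Int))
      = PySem.List.sorted (pvBuild _ _) (fun l => (l.length : Int))
  rw [pv_starts_bridge b B false 0, pv_ends_bridge b B 0, pv_build_eq_canon b B 0]
  simp [pvMerge]
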